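-- pv_equiv track=rewrite | github.com/Vivekrathore2002/PycharmProjects | RSA Serial Code/serial.py | prime_num_cal
-- ===== SOURCE A (Python) =====
-- def prime_num_cal(n):
--     # creating a list of numbers substituted with "True" in place
--     range_of_n = [True for x in range(n+1)]
--     #Smallest prime number
--     p=2
--     while(p*p <= n):
--         # If not 'false' then number is not prime
--         if (range_of_n[p] == True):
--             for i in range(p*p , n+1 , p):
--                 #Marking 'True' for the multiple of 'P'
--                 range_of_n[i]=False
--         p=p+1
--     prime_numbers=[]
--     for i in range(int(n*0.5),n+1):
--         if(range_of_n[i]==True):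
--             prime_numbers.append(i)
--     return prime_numbers
-- ===== SOURCE B (Python) =====
-- def prime_num_cal(n):
--     # Trial division instead of a sieve: no O(n) boolean table, O(1) extra memory.
--     prime_numbers = []
--     for i in range(int(n*0.5), n+1):
--         d = 2
--         no_divisor = True
--         while d * d <= i:
--             if i % d == 0:
--                 no_divisor = False
--                 break
--             d += 1
--         if no_divisor:
--             prime_numbers.append(i)
--     return prime_numbers
-- ===== Notes on version B (the rewrite author's own statement) =====
-- stated objective: simpler
-- what changed: Replaced the Eratosthenes sieve over a boolean table by direct trial division of each candidate in the same candidate range; candidates with an empty divisor loop pass naturally, matching A.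
import Mathlib
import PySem

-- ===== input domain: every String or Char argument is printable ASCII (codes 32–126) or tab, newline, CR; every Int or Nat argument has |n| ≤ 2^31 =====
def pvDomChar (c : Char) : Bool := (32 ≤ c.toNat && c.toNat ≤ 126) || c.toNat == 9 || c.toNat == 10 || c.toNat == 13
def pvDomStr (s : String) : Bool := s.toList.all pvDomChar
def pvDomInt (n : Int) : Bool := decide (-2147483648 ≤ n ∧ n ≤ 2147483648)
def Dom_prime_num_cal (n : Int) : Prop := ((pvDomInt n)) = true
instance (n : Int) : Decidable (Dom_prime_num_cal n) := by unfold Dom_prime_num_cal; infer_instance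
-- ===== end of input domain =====

-- B replaces A's Eratosthenes sieve (boolean table) by direct trial division of each
-- candidate in the same candidate range: simpler, no table.


-- termination helper for both while-loops: p*p ≤ n forces p ≤ n
theorem pv_sq_le {p n : Int} (h : p * p ≤ n) : p ≤ n := by
  by_cases hp : p ≤ 0
  · nlinarith [mul_self_nonneg p]
  · nlinarith [not_le.mp hp]

-- ===== PORT A =====
-- 'for i in range(p*p, n+1, p): range_of_n[i] = False'  (all indices are nonnegative and in range)
def sieveInner (lst : List Bool) (n p : Int) : List Bool :=
  (PySem.List.pyRange (p * p) (n + 1) p).foldl (fun l i => PySem.List.pySetD l i false) lst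

-- the 'while p*p <= n' loop; 'range_of_n[p] == True' read with pyGetD (p is always in range here)
def sieveLoop (lst : List Bool) (n p : Int) : List Bool :=
  if h : p * p ≤ n then
    sieveLoop (if PySem.List.pyGetD lst p true == true then sieveInner lst n p else lst) n (p + 1)
  else lst
termination_by (n + 1 - p).toNat
decreasing_by have := pv_sq_le h; omega

-- int(n*0.5) is exact truncation toward zero for |n| ≤ 2^31, i.e. Int.tdiv n 2
def prime_num_cal (n : Int) : List Int :=
  let range_of_n := List.replicate (n + 1).toNat true
  let sieved := sieveLoop range_of_n n 2
  (PySem.List.pyRange (n.tdiv 2) (n + 1) 1).foldl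
    (fun acc i => if PySem.List.pyGetD sieved i true == true then acc ++ [i] else acc) []

-- ===== PORT B =====
-- the 'while d*d <= i' loop with its break: returns the final value of no_divisor
def trialDiv (i d : Int) : Bool :=
  if h : d * d ≤ i then
    if PySem.Int.mod i d == 0 then false else trialDiv i (d + 1)
  else true
termination_by (i + 1 - d).toNat
decreasing_by have := pv_sq_le h; omega

def prime_num_cal_alt (n : Int) : List Int :=
  (PySem.List.pyRange (n.tdiv 2) (n + 1) 1).foldl
    (fun acc i => if trialDiv i 2 then acc ++ [i] else acc) []

-- ===== PRECONDITION & SPEC =====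
def Spec_prime_num_cal (n : Int) (out : List Int) : Prop := out = prime_num_cal_alt n
instance (n : Int) (out : List Int) : Decidable (Spec_prime_num_cal n out) := by unfold Spec_prime_num_cal; infer_instance

-- ===== CLAIM (what is proved, stated in full; the proofs are below) =====
def Claim_equal_prime_num_cal : Prop := ∀ (n : Int), Dom_prime_num_cal n → Spec_prime_num_cal n (prime_num_cal n)

-- ===== LEMMAS AND PROOFS =====

theorem trial_spec (i d : Int) : 2 ≤ d →
    (trialDiv i d = true ↔ ¬ ∃ e, d ≤ e ∧ e * e ≤ i ∧ e ∣ i) := by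
  refine trialDiv.induct i
    (fun d => 2 ≤ d → (trialDiv i d = true ↔ ¬ ∃ e, d ≤ e ∧ e * e ≤ i ∧ e ∣ i)) ?_ ?_ ?_ d
  · intro d h hm hd
    rw [trialDiv, dif_pos h, if_pos hm]
    constructor
    · intro hfalse; exact absurd hfalse (by simp)
    · intro hno
      exact absurd ⟨d, le_refl d, h, (PySem.Int.mod_eq_zero_iff_dvd i d).mp (by simpa using hm)⟩ hno
  · intro d h hm ih hd
    rw [trialDiv, dif_pos h, if_neg hm]
    rw [ih (by omega)]
    have hnd : ¬ d ∣ i := by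
      intro hdvd
      exact hm (by simpa using (PySem.Int.mod_eq_zero_iff_dvd i d).mpr hdvd)
    constructor
    · intro hno ⟨e, he, hee, hei⟩
      rcases eq_or_lt_of_le he with rfl | hlt
      · exact hnd hei
      · exact hno ⟨e, by omega, hee, hei⟩
    · intro hno ⟨e, he, hee, hei⟩
      exact hno ⟨e, by omega, hee, hei⟩
  · intro d h hd
    rw [trialDiv, dif_neg h]
    simp only [true_iff]
    intro ⟨e, he, hee, hei⟩
    have : d * d ≤ e * e := by nlinarith
    omega

theorem foldl_pySetD_length (l : List Int) (lst : List Bool) :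
    (l.foldl (fun ls i => PySem.List.pySetD ls i false) lst).length = lst.length := by
  induction l generalizing lst with
  | nil => rfl
  | cons i l ih => simp [List.foldl, ih, PySem.List.length_pySetD]

theorem foldl_pySetD_getD (l : List Int) (lst : List Bool) (j : Int)
    (hj : 0 ≤ j)
    (hl : ∀ i ∈ l, 0 ≤ i ∧ i < (lst.length : Int)) :
    PySem.List.pyGetD (l.foldl (fun ls i => PySem.List.pySetD ls i false) lst) j true
      = if j ∈ l then false else PySem.List.pyGetD lst j true := by
  induction l generalizing lst with
  | nil => simp
  | cons i l ih =>
      obtain ⟨hi0, hilt⟩ := hl i (by simp)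
      have hlen : (PySem.List.pySetD lst i false).length = lst.length :=
        PySem.List.length_pySetD lst i false
      have hrec := ih (PySem.List.pySetD lst i false)
        (by intro x hx; rw [hlen]; exact hl x (by simp [hx]))
      simp only [List.foldl] at *
      rw [hrec]
      have hset : PySem.List.pyGetD (PySem.List.pySetD lst i false) j true
          = if j.toNat = i.toNat then false else PySem.List.pyGetD lst j true := by
        have := PySem.List.pyGetD_pySetD_natCast lst i.toNat j.toNat false true (by omega)
        rw [show ((i.toNat : Int)) = i by omega, show ((j.toNat : Int)) = j by omega] at this
        exact this
      by_cases hmem : j ∈ l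
      · simp [hmem]
      · simp only [hmem, if_false, List.mem_cons, or_false]
        rw [hset]
        by_cases hji : j = i
        · simp [hji]
        · rw [if_neg (by omega), if_neg hji]

-- 'i marked false by the loop counters below p'
def markedBelow (p j : Int) : Prop := ∃ q, 2 ≤ q ∧ q < p ∧ q * q ≤ j ∧ q ∣ j

theorem sieveInner_getD (lst : List Bool) (n p j : Int)
    (hp : 2 ≤ p) (hj : 0 ≤ j) (hjn : j ≤ n) (hlen : lst.length = (n + 1).toNat) :
    PySem.List.pyGetD (sieveInner lst n p) j true
      = if p * p ≤ j ∧ p ∣ j then false else PySem.List.pyGetD lst j true := by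
  unfold sieveInner
  rw [foldl_pySetD_getD _ _ _ hj]
  · congr 1
    simp only [eq_iff_iff]
    rw [PySem.List.mem_pyRange_iff_of_pos (by omega)]
    constructor
    · rintro ⟨h1, _, h3⟩
      refine ⟨h1, ?_⟩
      have := h3.add (dvd_mul_left p p)
      simpa using this
    · rintro ⟨h1, h2⟩
      exact ⟨h1, by omega, h2.sub (dvd_mul_left p p)⟩
  · intro i hi
    rw [PySem.List.mem_pyRange_iff_of_pos (by omega)] at hi
    have : (0:Int) ≤ p * p := by positivity
    constructor
    · omega
    · rw [hlen]; omega

theorem sieveLoop_spec (lst : List Bool) (n p : Int) :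
    2 ≤ p → lst.length = (n + 1).toNat →
    (∀ j : Int, 0 ≤ j → j ≤ n → (PySem.List.pyGetD lst j true = false ↔ markedBelow p j)) →
    ∀ j : Int, 0 ≤ j → j ≤ n →
      (PySem.List.pyGetD (sieveLoop lst n p) j true = false ↔
        ∃ q, 2 ≤ q ∧ q * q ≤ j ∧ q ∣ j) := by
  refine sieveLoop.induct n (fun lst p => 2 ≤ p → lst.length = (n + 1).toNat →
      (∀ j : Int, 0 ≤ j → j ≤ n → (PySem.List.pyGetD lst j true = false ↔ markedBelow p j)) →
      ∀ j : Int, 0 ≤ j → j ≤ n →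
        (PySem.List.pyGetD (sieveLoop lst n p) j true = false ↔
          ∃ q, 2 ≤ q ∧ q * q ≤ j ∧ q ∣ j)) ?_ ?_ lst p
  · intro lst p h ih
    simp only [dite_eq_ite] at ih
    intro hp hlen hinv j hj hjn
    rw [sieveLoop, dif_pos h]
    have hpn : p ≤ n := pv_sq_le h
    -- the invariant for the updated list at p+1
    have hstep : ∀ j : Int, 0 ≤ j → j ≤ n →
        (PySem.List.pyGetD
          (if PySem.List.pyGetD lst p true == true then sieveInner lst n p else lst) j true
          = false ↔ markedBelow (p + 1) j) := by
      intro j hj hjn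
      by_cases hc : PySem.List.pyGetD lst p true = true
      · rw [if_pos (by simp [hc])]
        rw [sieveInner_getD lst n p j hp hj hjn hlen]
        unfold markedBelow
        by_cases hm : p * p ≤ j ∧ p ∣ j
        · rw [if_pos hm]
          exact ⟨fun _ => ⟨p, hp, by omega, hm.1, hm.2⟩, fun _ => rfl⟩
        · rw [if_neg hm, hinv j hj hjn]
          unfold markedBelow
          constructor
          · rintro ⟨q, h1, h2, h3, h4⟩; exact ⟨q, h1, by omega, h3, h4⟩
          · rintro ⟨q, h1, h2, h3, h4⟩
            refine ⟨q, h1, ?_, h3, h4⟩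
            rcases lt_or_eq_of_le (by omega : q ≤ p) with hlt | rfl
            · exact hlt
            · exact absurd ⟨h3, h4⟩ hm
      · rw [if_neg (by simpa using hc)]
        -- lst[p] is already False: p is composite, its multiples are covered by a smaller q
        have hpfalse : PySem.List.pyGetD lst p true = false := by
          cases hx : PySem.List.pyGetD lst p true
          · rfl
          · exact absurd hx hc
        have hcomp : markedBelow p p := (hinv p (by omega) hpn).mp hpfalse
        rw [hinv j hj hjn]
        unfold markedBelow
        constructor
        · rintro ⟨q, h1, h2, h3, h4⟩; exact ⟨q, h1, by omega, h3, h4⟩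
        · rintro ⟨q, h1, h2, h3, h4⟩
          rcases lt_or_eq_of_le (by omega : q ≤ p) with hlt | rfl
          · exact ⟨q, h1, hlt, h3, h4⟩
          · obtain ⟨r, hr1, hr2, hr3, hr4⟩ := hcomp
            refine ⟨r, hr1, hr2, ?_, hr4.trans h4⟩
            nlinarith
    have hlen' : (if PySem.List.pyGetD lst p true == true then sieveInner lst n p else lst).length
        = (n + 1).toNat := by
      split
      · unfold sieveInner; rw [foldl_pySetD_length, hlen]
      · exact hlen
    exact ih (by omega) hlen' hstep j hj hjn
  · intro lst p h hp hlen hinv j hj hjn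
    rw [sieveLoop, dif_neg h]
    rw [hinv j hj hjn]
    unfold markedBelow
    constructor
    · rintro ⟨q, h1, h2, h3, h4⟩; exact ⟨q, h1, h3, h4⟩
    · rintro ⟨q, h1, h3, h4⟩
      refine ⟨q, h1, ?_, h3, h4⟩
      by_contra hqp
      have : p * p ≤ q * q := by nlinarith
      omega

-- truncating division agrees with floor division for n ≥ 0 and makes the range empty for n < 0
theorem tdiv_two_neg {n : Int} (hn : n < 0) : n + 1 ≤ n.tdiv 2 := by
  have h1 : n.tdiv 2 = -((-n).tdiv 2) := by
    rw [show n = -(-n) by ring, Int.neg_tdiv]; ring_nf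
  have h2 : (-n).tdiv 2 = (-n) / 2 := Int.tdiv_eq_ediv_of_nonneg (by omega)
  omega

theorem tdiv_two_nonneg {n : Int} (hn : 0 ≤ n) : 0 ≤ n.tdiv 2 := by
  have h2 : n.tdiv 2 = n / 2 := Int.tdiv_eq_ediv_of_nonneg hn
  omega

-- ===== VERDICT (by name: the statement is the Claim_ definition above) =====
theorem prime_num_cal_spec : Claim_equal_prime_num_cal := by
  intro n _
  unfold Spec_prime_num_cal prime_num_cal prime_num_cal_alt
  simp only []
  by_cases hn : n < 0
  · rw [PySem.List.pyRange_one_eq_nil (tdiv_two_neg hn)]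
    simp
  · push Not at hn
    -- both folds are filters over the same range; compare the tests pointwise
    have hA := PySem.List.foldl_append_if_eq_filter
      (fun i => PySem.List.pyGetD (sieveLoop (List.replicate (n + 1).toNat true) n 2) i true == true)
      (PySem.List.pyRange (n.tdiv 2) (n + 1) 1) ([] : List Int)
    have hB := PySem.List.foldl_append_if_eq_filter
      (fun i => trialDiv i 2)
      (PySem.List.pyRange (n.tdiv 2) (n + 1) 1) ([] : List Int)
    rw [hA, hB]
    simp only [List.nil_append]
    apply List.filter_congr
    intro i hi
    rw [PySem.List.mem_pyRange_one] at hi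
    have hi0 : 0 ≤ i := le_trans (tdiv_two_nonneg hn) hi.1
    have hin : i ≤ n := by omega
    have hsieve := sieveLoop_spec (List.replicate (n + 1).toNat true) n 2 (le_refl 2)
      (by simp)
      (by
        intro j hj hjn
        have : PySem.List.pyGetD (List.replicate (n + 1).toNat true) j true = true := by
          rw [PySem.List.pyGetD_of_nonneg _ _ hj, List.getD_replicate]
          omega
        rw [this]
        unfold markedBelow
        constructor
        · intro hfalse; exact absurd hfalse (by simp)
        · rintro ⟨q, h1, h2, _⟩; omega)
      i hi0 hin
    have htrial := trial_spec i 2 (le_refl 2)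
    cases hx : PySem.List.pyGetD (sieveLoop (List.replicate (n + 1).toNat true) n 2) i true
    · cases hy : trialDiv i 2
      · simp
      · exact absurd (hsieve.mp hx) (htrial.mp hy)
    · cases hy : trialDiv i 2
      · rw [hy] at htrial
        have hex : ∃ e, 2 ≤ e ∧ e * e ≤ i ∧ e ∣ i := by
          by_contra hno
          exact absurd (htrial.mpr hno) (by simp)
        rw [hx] at hsieve
        exact absurd (hsieve.mpr hex) (by simp)
      · simp
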